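-- pv_equiv track=rewrite | github.com/ErickFJSantos314/Histolens-Smartscope | maestro.py | _is_medgemma_error
-- ===== SOURCE A (Python) =====
-- def _is_medgemma_error(text: str) -> bool:
--     lowered = text.lower()
--     return any(
--         token in lowered
--         for token in [
--             "api error",
--             "api timeout",
--             "api connection error",
--             "model load error",
--             "import error",
--             "not a valid model identifier",
--             "medgemma failure",
--         ]
--     )
-- ===== SOURCE B (Python) =====
-- _TOKENS = (
--     "api error",
--     "api timeout",
--     "api connection error",
--     "model load error",
--     "import error",
--     "not a valid model identifier",
--     "medgemma failure",
-- )
--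
-- def _is_medgemma_error(text: str) -> bool:
--     # single scan: at each position test whether some token starts there
--     s = text.lower()
--     for i in range(len(s)):
--         tail = s[i:]
--         if any(tail.startswith(tok) for tok in _TOKENS):
--             return True
--     return False
-- ===== Notes on version B (the rewrite author's own statement) =====
-- stated objective: alternative
-- what changed: Replaces seven independent substring-membership tests with a single left-to-right scan over the lowered text that tests at each position whether any token starts there.
import Mathlib
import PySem

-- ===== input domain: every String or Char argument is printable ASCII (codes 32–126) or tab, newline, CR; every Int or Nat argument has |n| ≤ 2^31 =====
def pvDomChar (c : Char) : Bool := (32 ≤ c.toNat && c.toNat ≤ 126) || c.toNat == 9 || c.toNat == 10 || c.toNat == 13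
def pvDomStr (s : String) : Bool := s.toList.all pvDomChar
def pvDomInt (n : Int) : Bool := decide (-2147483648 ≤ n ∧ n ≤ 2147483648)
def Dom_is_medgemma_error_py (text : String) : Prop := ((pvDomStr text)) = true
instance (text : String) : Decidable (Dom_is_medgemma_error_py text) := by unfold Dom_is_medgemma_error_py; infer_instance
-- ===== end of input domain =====

-- B changes the traversal (one positional scan with prefix tests instead of seven substring tests); same results, no speed claim.

-- ===== PORT A =====
-- A: lowered = text.lower(); any(token in lowered for token in [...])
def is_medgemma_error_py (text : String) : Bool :=
  let lowered := PySem.Str.lower text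
  [ "api error",
    "api timeout",
    "api connection error",
    "model load error",
    "import error",
    "not a valid model identifier",
    "medgemma failure" ].any (fun tok => PySem.Str.isIn tok lowered)

-- ===== PORT B =====
-- B's module-level token tuple, as lowered char lists (the strings are already lowercase literals)
def altTokens : List (List Char) :=
  [ "api error".toList,
    "api timeout".toList,
    "api connection error".toList,
    "model load error".toList,
    "import error".toList,
    "not a valid model identifier".toList,
    "medgemma failure".toList ]

-- B's loop 'for i in range(len(s)): tail = s[i:]; if any(tail.startswith(tok)...)': recursion over suffixes
def altScan (cs : List Char) : Bool :=
  match cs with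
  | [] => false
  | _ :: rest =>
      (altTokens.any fun tok => PySem.Chars.startswith cs tok) || altScan rest

def is_medgemma_error_py_alt (text : String) : Bool :=
  altScan (PySem.Str.lower text).toList

-- ===== PRECONDITION & SPEC =====
def Spec_is_medgemma_error_py (text : String) (out : Bool) : Prop := out = is_medgemma_error_py_alt text
instance (text : String) (out : Bool) : Decidable (Spec_is_medgemma_error_py text out) := by unfold Spec_is_medgemma_error_py; infer_instance

-- ===== CLAIM (what is proved, stated in full; the proofs are below) =====
def Claim_equal_is_medgemma_error_py : Prop := ∀ (text : String), Dom_is_medgemma_error_py text → Spec_is_medgemma_error_py text (is_medgemma_error_py text)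

-- ===== LEMMAS AND PROOFS =====

-- the scan finds exactly the tokens occurring as an infix (every token is nonempty)
theorem altScan_iff (cs : List Char) :
    altScan cs = true ↔ ∃ t ∈ altTokens, t <:+: cs := by
  induction cs with
  | nil =>
      simp only [altScan, List.infix_nil]
      constructor
      · intro h; exact absurd h (by decide)
      · rintro ⟨t, ht, rfl⟩; revert ht; decide
  | cons c rest ih =>
      simp only [altScan, Bool.or_eq_true, List.any_eq_true,
        PySem.Chars.startswith_iff, ih, List.infix_cons_iff]
      constructor
      · rintro (⟨t, ht, hp⟩ | ⟨t, ht, hi⟩)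
        · exact ⟨t, ht, Or.inl hp⟩
        · exact ⟨t, ht, Or.inr hi⟩
      · rintro ⟨t, ht, hp | hi⟩
        · exact Or.inl ⟨t, ht, hp⟩
        · exact Or.inr ⟨t, ht, hi⟩

theorem altTokens_eq :
    altTokens =
      [ "api error", "api timeout", "api connection error", "model load error",
        "import error", "not a valid model identifier",
        "medgemma failure" ].map String.toList := rfl

theorem ab_agree (text : String) :
    is_medgemma_error_py text = is_medgemma_error_py_alt text := by
  unfold is_medgemma_error_py is_medgemma_error_py_alt
  rw [Bool.eq_iff_iff, altScan_iff, altTokens_eq]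
  simp only [List.any_eq_true, PySem.Str.isIn_iff_infix, List.mem_map]
  constructor
  · rintro ⟨tok, htok, hin⟩
    exact ⟨tok.toList, ⟨tok, htok, rfl⟩, hin⟩
  · rintro ⟨t, ⟨tok, htok, rfl⟩, hin⟩
    exact ⟨tok, htok, hin⟩

-- ===== VERDICT (by name: the statement is the Claim_ definition above) =====
theorem is_medgemma_error_py_spec : Claim_equal_is_medgemma_error_py := by
  intro text _
  exact ab_agree text
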